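-- pv_equiv track=rewrite | github.com/lilly9117/Programmers_Algorithm_HBYM | Yumin/Lv2_문자열압축.py | solution
-- ===== SOURCE A (Python) =====
-- def solution(s):
--     answer = [len(s)]  # 압축 전 문자열 길이
--
--     for cut in range(1, len(s) // 2 + 1):
--         tmp = ''
--         cnt = 1
--         a = s[:cut]
--
--         for i in range(cut, cut + len(s), cut):
--
--             # 직전 단위와 동일한 경우
--             if a == s[i:i + cut]:
--                 cnt += 1
--
--             # 직전 단위와 다른 경우 - 문자열 압축
--             else:
--                 tmp += a if cnt == 1 else str(cnt) + a
--                 a = s[i:i + cut]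
--                 cnt = 1
--
--         answer.append(len(tmp))  # cut단위로 압축한 문자열 길이
--     return min(answer)
-- ===== SOURCE B (Python) =====
-- def solution(s):
--     n = len(s)
--     best = n
--     for cut in range(1, n // 2 + 1):
--         # positions where a new run of equal cut-sized chunks begins, plus sentinel n
--         starts = [i for i in range(0, n, cut) if i == 0 or s[i:i + cut] != s[i - cut:i]] + [n]
--         total = 0
--         for a, b in zip(starts, starts[1:]):
--             total += min(b - a, cut) + (len(str((b - a) // cut)) if b - a > cut else 0)
--         best = min(best, total)
--     return best
-- ===== Notes on version B (the rewrite author's own statement) =====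
-- stated objective: alternative
-- what changed: A streams over the chunk sequence with run-length state (tmp,cnt,a), building the compressed string and measuring its length; B never run-length-encodes: per cut it collects the positions where a new run starts with one filtered comprehension (comparing each chunk with its predecessor in place), appends a sentinel, and derives the encoded length arithmetically from consecutive boundary gaps (min(gap,cut) plus digits of gap//cut), summing integers in a second pass.
import Mathlib
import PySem

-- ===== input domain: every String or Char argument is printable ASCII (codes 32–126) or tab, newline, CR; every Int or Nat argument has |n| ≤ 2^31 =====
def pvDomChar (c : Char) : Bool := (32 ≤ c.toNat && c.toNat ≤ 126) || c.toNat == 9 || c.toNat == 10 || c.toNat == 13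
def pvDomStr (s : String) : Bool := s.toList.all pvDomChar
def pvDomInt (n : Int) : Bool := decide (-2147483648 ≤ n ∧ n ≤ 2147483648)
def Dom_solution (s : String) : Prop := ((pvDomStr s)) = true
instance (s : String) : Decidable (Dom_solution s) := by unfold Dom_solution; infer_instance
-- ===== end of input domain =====

-- B replaces A's streaming run-length state machine (tmp/cnt/a, which builds the compressed
-- string and measures it) by a two-pass boundary computation: per cut it filters the run-start
-- positions, then sums encoded lengths arithmetically from consecutive boundary gaps
-- (objective: alternative; same asymptotic cost).

-- ===== PORT A =====
-- A's inner-loop state: (tmp, cnt, a)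
def pvStepA (cs : List Char) (cut : Int) (st : List Char × Int × List Char) (i : Int) :
    List Char × Int × List Char :=
  if st.2.2 == PySem.List.slice cs (some i) (some (i + cut)) then
    (st.1, st.2.1 + 1, st.2.2)
  else
    (st.1 ++ (if st.2.1 == 1 then st.2.2 else PySem.Int.toChars st.2.1 ++ st.2.2),
     1, PySem.List.slice cs (some i) (some (i + cut)))

def solution (s : String) : Int :=
  let cs : List Char := s.toList
  let n : Int := PySem.Chars.len cs
  let answer : List Int := [n]
  let answer : List Int :=
    (PySem.List.pyRange 1 (PySem.Int.floordiv n 2 + 1) 1).foldl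
      (fun ans cut =>
        let st := (PySem.List.pyRange cut (cut + n) cut).foldl (pvStepA cs cut)
          ([], 1, PySem.List.slice cs none (some cut))
        ans ++ [(st.1.length : Int)]) answer
  match PySem.List.min? answer (fun y => y) with
  | some m => m
  | none => 0   -- unreachable: answer is nonempty

-- ===== PORT B =====
def solution_alt (s : String) : Int :=
  let cs : List Char := s.toList
  let n : Int := (cs.length : Int)
  (PySem.List.pyRange 1 (n / 2 + 1) 1).foldl
    (fun best cut =>
      let starts : List Int :=
        ((PySem.List.pyRange 0 n cut).filter
          (fun i => i == 0 ||
            !(PySem.List.slice cs (some i) (some (i + cut))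
              == PySem.List.slice cs (some (i - cut)) (some i)))) ++ [n]
      let total : Int :=
        (starts.zip (PySem.List.slice starts (some 1) none)).foldl
          (fun tot ab => tot + (min (ab.2 - ab.1) cut +
            (if ab.2 - ab.1 > cut then
              ((PySem.Int.toChars (PySem.Int.floordiv (ab.2 - ab.1) cut)).length : Int)
            else 0))) 0
      min best total) n

-- ===== PRECONDITION & SPEC =====
def Spec_solution (s : String) (out : Int) : Prop := out = solution_alt s
instance (s : String) (out : Int) : Decidable (Spec_solution s out) := by unfold Spec_solution; infer_instance

-- ===== CLAIM (what is proved, stated in full; the proofs are below) =====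
def Claim_equal_solution : Prop := ∀ (s : String), Dom_solution s → Spec_solution s (solution s)

-- ===== LEMMAS AND PROOFS =====

-- the length contribution of one run: flush text of A (as chars)
def pvFlush (cnt : Int) (a : List Char) : List Char :=
  if cnt == 1 then a else PySem.Int.toChars cnt ++ a

-- run-length-compressed length of a chunk list
def pvRle : List (List Char) → Int
  | [] => 0
  | h :: t =>
      ((pvFlush (1 + ((t.takeWhile (· == h)).length : Int)) h).length : Int)
        + pvRle (t.dropWhile (· == h))
termination_by l => l.length
decreasing_by
  have := List.length_dropWhile_le (· == h) t
  simp only [List.length_cons]; omega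

-- the chunk list [u[:c], u[c:2c], …] (chunk size c+1 so that it is total)
def pvChunks (c : Nat) : List Char → List (List Char)
  | [] => []
  | x :: xs => (x :: xs).take (c + 1) :: pvChunks c (xs.drop c)
termination_by t => t.length
decreasing_by
  simp only [List.length_drop, List.length_cons]; omega

theorem pvChunks_nil (c : Nat) : pvChunks c [] = [] := by rw [pvChunks]

theorem pvChunks_cons (c : Nat) (x : Char) (xs : List Char) :
    pvChunks c (x :: xs) = (x :: xs).take (c + 1) :: pvChunks c ((x :: xs).drop (c + 1)) := by
  rw [pvChunks, List.drop_succ_cons]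

theorem pvChunks_ne (c : Nat) (hc : 1 ≤ c) (cs : List Char) (h : cs ≠ []) :
    pvChunks (c - 1) cs = cs.take c :: pvChunks (c - 1) (cs.drop c) := by
  obtain ⟨x, xs, rfl⟩ := List.exists_cons_of_ne_nil h
  have hc1 : c - 1 + 1 = c := by omega
  rw [pvChunks_cons, hc1]

theorem pvRle_nil : pvRle [] = 0 := by rw [pvRle]

-- A's inner step seen as a function of the sliced piece
def pvStepP (st : List Char × Int × List Char) (p : List Char) :
    List Char × Int × List Char :=
  if st.2.2 == p then (st.1, st.2.1 + 1, st.2.2)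
  else (st.1 ++ pvFlush st.2.1 st.2.2, 1, p)

-- compressed length of (pending run of cnt copies of a) followed by pieces L
def pvRleFrom (cnt : Int) (a : List Char) : List (List Char) → Int
  | [] => ((pvFlush cnt a).length : Int)
  | h :: t =>
      if h == a then pvRleFrom (cnt + 1) a t
      else ((pvFlush cnt a).length : Int) + pvRleFrom 1 h t

theorem pvStepA_eq_stepP (cs : List Char) (cut : Int) (st : List Char × Int × List Char)
    (i : Int) : pvStepA cs cut st i = pvStepP st (PySem.List.slice cs (some i) (some (i + cut))) := by
  rfl

theorem pvRleFrom_eq (L : List (List Char)) : ∀ (cnt : Int) (a : List Char),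
    pvRleFrom cnt a L =
      ((pvFlush (cnt + ((L.takeWhile (· == a)).length : Int)) a).length : Int)
        + pvRle (L.dropWhile (· == a)) := by
  induction L with
  | nil => intro cnt a; simp [pvRleFrom, pvRle]
  | cons h t ih =>
    intro cnt a
    by_cases hb : (h == a) = true
    · have ha : h = a := by simpa using hb
      simp only [pvRleFrom, hb, if_true, List.takeWhile_cons, List.dropWhile_cons, ih]
      have harg : cnt + 1 + ((t.takeWhile (· == a)).length : Int)
           = cnt + (((t.takeWhile (· == a)).length : Int) + 1) := by ring
      subst ha
      simp [harg]
    · simp only [pvRleFrom, hb, List.takeWhile_cons, List.dropWhile_cons]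
      rw [ih 1 h]
      simp only [if_false, Bool.false_eq_true]
      simp [pvRle]

theorem pvRleFrom_one (h : List Char) (t : List (List Char)) :
    pvRleFrom 1 h t = pvRle (h :: t) := by
  rw [pvRleFrom_eq, pvRle]

theorem pvFoldA (L : List (List Char)) : ∀ (tmp : List Char) (cnt : Int) (a : List Char),
    a ≠ [] → (∀ x ∈ L, x ≠ []) →
    ((((L ++ [([] : List Char)]).foldl pvStepP (tmp, cnt, a)).1.length : Int))
      = (tmp.length : Int) + pvRleFrom cnt a L := by
  induction L with
  | nil =>
    intro tmp cnt a ha _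
    have hne : (a == ([] : List Char)) = false := by
      simpa using ha
    simp [pvStepP, pvRleFrom, hne]
  | cons h t ih =>
    intro tmp cnt a ha hL
    have hh : h ≠ [] := hL h (List.mem_cons_self)
    have ht : ∀ x ∈ t, x ≠ [] := fun x hx => hL x (List.mem_cons_of_mem _ hx)
    by_cases hb : (a == h) = true
    · have hab : h = a := (beq_iff_eq.mp hb).symm
      simp only [List.cons_append, List.foldl_cons, pvStepP, hb, if_true]
      rw [ih tmp (cnt + 1) a ha ht, pvRleFrom]
      have : (h == a) = true := by simp [hab]
      simp [this]
    · simp only [List.cons_append, List.foldl_cons, pvStepP, hb, Bool.false_eq_true, if_false]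
      rw [ih (tmp ++ pvFlush cnt a) 1 h hh ht, pvRleFrom]
      have hba : (h == a) = false := by
        have hne : ¬ a = h := by simpa using hb
        exact beq_eq_false_iff_ne.mpr (fun e => hne e.symm)
      simp [hba]
      ring

-- one chunk of cs at a nonnegative start below the length is nonempty
theorem pvSliceNe (cs : List Char) (i cut : Int) (h0 : 0 ≤ i) (hi : i < (cs.length : Int))
    (hc : 1 ≤ cut) : PySem.List.slice cs (some i) (some (i + cut)) ≠ [] := by
  rw [PySem.List.slice_toNat cs h0 (by omega)]
  intro hnil
  have h1 := List.length_eq_zero_iff.mpr hnil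
  rw [List.length_take, List.length_drop] at h1
  omega

-- a chunk starting at or past the end is empty
theorem pvSliceNil (cs : List Char) (i cut : Int) (h0 : 0 ≤ i) (hc : 0 ≤ cut)
    (hi : (cs.length : Int) ≤ i) : PySem.List.slice cs (some i) (some (i + cut)) = [] := by
  rw [PySem.List.slice_toNat cs h0 (by omega)]
  have : cs.length ≤ i.toNat := by omega
  rw [List.drop_eq_nil_of_le this, List.take_nil]

-- ===== A-side: the per-cut fold computes pvRle of the chunk list =====
theorem pvPerCutA (cs : List Char) (cut : Int) (h1 : 1 ≤ cut)
    (h2 : cut ≤ (cs.length : Int) / 2) :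
    ((((PySem.List.pyRange cut (cut + (cs.length : Int)) cut).foldl (pvStepA cs cut)
        ([], 1, PySem.List.slice cs none (some cut))).1.length : Int))
      = pvRle ((PySem.List.pyRange 0 (cs.length : Int) cut).map
          (fun i => PySem.List.slice cs (some i) (some (i + cut)))) := by
  have hcpos : (0 : Int) < cut := by omega
  have hn2 : 2 * cut ≤ (cs.length : Int) := by
    have := (Int.le_ediv_iff_mul_le (by norm_num : (0:Int) < 2)).mp h2
    omega
  set N : Int := (cs.length : Int) with hN
  have hNpos : 0 < N := by omega
  set f : Int → List Char := fun i => PySem.List.slice cs (some i) (some (i + cut)) with hf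
  obtain ⟨q, hq1, hq2, hq3⟩ :
      ∃ q : Int, (N + cut - 1) / cut = q ∧ N ≤ cut * q ∧ cut * q < N + cut := by
    have hqr := Int.mul_ediv_add_emod (N + cut - 1) cut
    have hr0 : 0 ≤ (N + cut - 1) % cut := Int.emod_nonneg _ (by omega)
    have hrlt : (N + cut - 1) % cut < cut := Int.emod_lt_of_pos _ hcpos
    exact ⟨_, rfl, by omega, by omega⟩
  have hqpos : 0 < q := by nlinarith [hq2, hcpos, hn2, h1]
  set K : Nat := q.toNat with hKdef
  have hKq : (K : Int) = q := Int.toNat_of_nonneg (by omega)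
  have hK1 : 1 ≤ K := by omega
  have hrangeA : PySem.List.pyRange cut (cut + N) cut
      = (List.range K).map (fun k : Nat => cut + cut * (k : Int)) := by
    rw [PySem.List.pyRange_of_pos _ _ hcpos, if_pos (by omega)]
    rw [show cut + N - cut + cut - 1 = N + cut - 1 from by ring, hq1, ← hKdef]
  have hrangeB : PySem.List.pyRange 0 N cut
      = (List.range K).map (fun k : Nat => cut * (k : Int)) := by
    rw [PySem.List.pyRange_of_pos _ _ hcpos, if_pos (by omega)]
    rw [show N - 0 + cut - 1 = N + cut - 1 from by ring, hq1, ← hKdef]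
    exact List.map_congr_left (fun k _ => by ring)
  set K' : Nat := K - 1 with hK'def
  have hKsucc : K = K' + 1 := by omega
  have hK'q : (K' : Int) = q - 1 := by omega
  set T : List (List Char) := (List.range K').map (fun k : Nat => f (cut + cut * (k : Int)))
    with hT
  have hchunks : (PySem.List.pyRange 0 N cut).map f = f 0 :: T := by
    rw [hrangeB, List.map_map, hKsucc, List.range_succ_eq_map, List.map_cons, List.map_map]
    congr 1
    · show f (cut * ((0 : Nat) : Int)) = f 0
      norm_num
    · rw [hT]
      exact List.map_congr_left (fun k _ => by
        show f (cut * (((k + 1 : Nat)) : Int)) = f (cut + cut * (k : Int))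
        congr 1
        push_cast
        ring)
  have hlast : f (cut + cut * (K' : Int)) = [] := by
    have he : cut + cut * ((K' : Int)) = cut * q := by rw [hK'q]; ring
    rw [he]
    exact pvSliceNil cs _ cut (by omega) (by omega) (by omega)
  have hpieces : (List.range K).map (fun k : Nat => f (cut + cut * (k : Int))) = T ++ [[]] := by
    rw [hKsucc, List.range_succ, List.map_append, List.map_singleton, hlast, hT]
  have hTne : ∀ x ∈ T, x ≠ [] := by
    intro x hx
    rw [hT] at hx
    obtain ⟨k, hk, hfx⟩ := List.mem_map.mp hx
    rw [List.mem_range] at hk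
    have hk1 : (k : Int) + 1 ≤ (K' : Int) := by exact_mod_cast hk
    have hkpos : 0 ≤ cut * (k : Int) := by positivity
    have e1 : cut + cut * (k : Int) = cut * ((k : Int) + 1) := by ring
    have hmul : cut * ((k : Int) + 1) ≤ cut * ((K' : Int)) :=
      mul_le_mul_of_nonneg_left hk1 (by omega)
    have e2 : cut * ((K' : Int)) = cut * q - cut := by rw [hK'q]; ring
    exact hfx ▸ pvSliceNe cs _ cut (by omega) (by omega) h1
  have hheadne : f 0 ≠ [] := pvSliceNe cs 0 cut le_rfl (by omega) h1
  have hAside : (PySem.List.pyRange cut (cut + N) cut).foldl (pvStepA cs cut)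
        ([], 1, PySem.List.slice cs none (some cut))
      = (T ++ [[]]).foldl pvStepP ([], 1, f 0) := by
    rw [hrangeA, List.foldl_map, ← hpieces]
    have hinit : PySem.List.slice cs none (some cut) = f 0 := by
      rw [hf, ← PySem.List.slice_zero_start]
      norm_num
    rw [hinit, List.foldl_map]
    apply PySem.List.foldl_congr_mem
    intro acc x _
    simp only [hf]
    exact pvStepA_eq_stepP cs cut acc _
  rw [hAside, pvFoldA T [] 1 (f 0) hheadne hTne, pvRleFrom_one, hchunks]
  simp

-- ===== chunk-list infrastructure shared by both directions =====

-- the pyRange-generated chunk list IS pvChunks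
theorem pvSliceShift (cs : List Char) (c k : Nat) :
    PySem.List.slice cs (some ((c : Int) * ((k : Int) + 1)))
        (some ((c : Int) * ((k : Int) + 1) + (c : Int)))
      = PySem.List.slice (cs.drop c) (some ((c : Int) * (k : Int)))
        (some ((c : Int) * (k : Int) + (c : Int))) := by
  have h1 : (c : Int) * ((k : Int) + 1) = ((c * (k + 1) : Nat) : Int) := by push_cast; ring
  have h2 : (c : Int) * (k : Int) = ((c * k : Nat) : Int) := by push_cast; ring
  rw [h1, h2, PySem.List.slice_natCast_add, PySem.List.slice_natCast_add,
    List.drop_drop]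
  congr 2
  ring

theorem pvChunksEq (c : Nat) (hc : 1 ≤ c) (cs : List Char) :
    (PySem.List.pyRange 0 (cs.length : Int) (c : Int)).map
      (fun i => PySem.List.slice cs (some i) (some (i + (c : Int))))
      = pvChunks (c - 1) cs := by
  have hcpos : (0 : Int) < (c : Int) := by exact_mod_cast hc
  rcases eq_or_ne cs ([] : List Char) with hnil | hne
  · subst hnil
    rw [PySem.List.pyRange_of_pos _ _ hcpos]
    simp [pvChunks_nil]
  · have hlen0 : cs.length ≠ 0 := fun h => hne (List.length_eq_zero_iff.mp h)
    have hNpos : (0 : Int) < (cs.length : Int) := by omega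
    have hN' : (((cs.drop c).length : Int)) = max ((cs.length : Int) - (c : Int)) 0 := by
      rw [List.length_drop]; omega
    have hq'0 : 0 ≤ (((cs.drop c).length : Int) - 0 + (c : Int) - 1) / (c : Int) :=
      Int.ediv_nonneg (by omega) (by omega)
    have hq : ((cs.length : Int) - 0 + (c : Int) - 1) / (c : Int)
        = (((cs.drop c).length : Int) - 0 + (c : Int) - 1) / (c : Int) + 1 := by
      rcases le_or_gt (cs.length : Int) (c : Int) with hle | hgt
      · have h0 : ((cs.drop c).length : Int) = 0 := by omega
        have hz : (((cs.drop c).length : Int) - 0 + (c : Int) - 1) / (c : Int) = 0 := by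
          rw [h0]
          exact Int.ediv_eq_zero_of_lt (by omega) (by omega)
        have e : (cs.length : Int) - 0 + (c : Int) - 1
            = ((cs.length : Int) - 1) + 1 * (c : Int) := by ring
        have hz2 : ((cs.length : Int) - 1) / (c : Int) = 0 :=
          Int.ediv_eq_zero_of_lt (by omega) (by omega)
        rw [hz, e, Int.add_mul_ediv_right _ _ (by omega), hz2]
      · have e : (cs.length : Int) - 0 + (c : Int) - 1
            = ((cs.length : Int) - 1) + 1 * (c : Int) := by ring
        have e2 : ((cs.drop c).length : Int) - 0 + (c : Int) - 1 = (cs.length : Int) - 1 := by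
          omega
        rw [e, Int.add_mul_ediv_right _ _ (by omega), e2]
    rw [PySem.List.pyRange_of_pos _ _ hcpos, if_pos (by omega)]
    have htoNat : (((cs.length : Int) - 0 + (c : Int) - 1) / (c : Int)).toNat
        = ((((cs.drop c).length : Int) - 0 + (c : Int) - 1) / (c : Int)).toNat + 1 := by
      omega
    rw [htoNat, List.map_map, List.range_succ_eq_map, List.map_cons, List.map_map]
    rw [pvChunks_ne c hc cs hne]
    congr 1
    · show PySem.List.slice cs (some (0 + (c : Int) * ((0 : Nat) : Int)))
        (some (0 + (c : Int) * ((0 : Nat) : Int) + (c : Int))) = cs.take c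
      have e0 : (0 : Int) + (c : Int) * ((0 : Nat) : Int) = ((0 : Nat) : Int) := by
        push_cast; ring
      rw [e0, PySem.List.slice_natCast_add, List.drop_zero]
    · have hrec := pvChunksEq c hc (cs.drop c)
      rcases eq_or_ne (cs.drop c) ([] : List Char) with hdz | hdn
      · have h0 : ((cs.drop c).length : Int) = 0 := by rw [hdz]; rfl
        have hz : ((((cs.drop c).length : Int) - 0 + (c : Int) - 1) / (c : Int)).toNat = 0 := by
          rw [h0, Int.ediv_eq_zero_of_lt (by omega) (by omega)]
          rfl
        rw [hz, List.range_zero, List.map_nil, hdz, pvChunks_nil]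
      · have hdpos : (0 : Int) < ((cs.drop c).length : Int) := by
          have : (cs.drop c).length ≠ 0 := fun h => hdn (List.length_eq_zero_iff.mp h)
          omega
        rw [PySem.List.pyRange_of_pos _ _ hcpos, if_pos (by omega), List.map_map] at hrec
        rw [← hrec]
        apply List.map_congr_left
        intro k _
        show PySem.List.slice cs (some (0 + (c : Int) * ((Nat.succ k : Nat) : Int)))
            (some (0 + (c : Int) * ((Nat.succ k : Nat) : Int) + (c : Int)))
          = PySem.List.slice (cs.drop c) (some (0 + (c : Int) * ((k : Nat) : Int)))
            (some (0 + (c : Int) * ((k : Nat) : Int) + (c : Int)))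
        have e1 : (0 : Int) + (c : Int) * ((Nat.succ k : Nat) : Int)
            = (c : Int) * ((k : Int) + 1) := by push_cast; ring
        have e2 : (0 : Int) + (c : Int) * ((k : Nat) : Int) = (c : Int) * (k : Int) := by ring
        rw [e1, e2]
        exact pvSliceShift cs c k
termination_by cs.length
decreasing_by
  simp only [List.length_drop]
  omega


-- dropping the counted run from the string drops the matched chunks from the chunk list
theorem pvDropRun (c : Nat) (hc : 1 ≤ c) (head : List Char) (u : List Char) :
    (pvChunks (c - 1) u).dropWhile (· == head)
      = pvChunks (c - 1)
          (u.drop (((pvChunks (c - 1) u).takeWhile (· == head)).length * c)) := by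
  rcases eq_or_ne u ([] : List Char) with hnil | hne
  · subst hnil
    rw [pvChunks_nil]
    simp [pvChunks_nil]
  · rw [pvChunks_ne c hc u hne]
    by_cases hb : (u.take c == head) = true
    · rw [List.dropWhile_cons, if_pos hb, List.takeWhile_cons, if_pos hb, List.length_cons]
      rw [pvDropRun c hc head (u.drop c), List.drop_drop]
      congr 2
      ring
    · rw [List.dropWhile_cons, if_neg (by simpa using hb), List.takeWhile_cons,
        if_neg (by simpa using hb)]
      simp only [List.length_nil, Nat.zero_mul, List.drop_zero]
      rw [pvChunks_ne c hc u hne]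
termination_by u.length
decreasing_by
  have : u.length ≠ 0 := fun h => hne (List.length_eq_zero_iff.mp h)
  simp only [List.length_drop]
  omega

-- ===== B-side: boundary positions and pairwise gaps compute pvRle of the chunk list =====

-- one encoded-run length from a boundary pair
def pvG (c : Int) (ab : Int × Int) : Int :=
  min (ab.2 - ab.1) c +
    (if ab.2 - ab.1 > c then
      ((PySem.Int.toChars (PySem.Int.floordiv (ab.2 - ab.1) c)).length : Int)
    else 0)

-- B's filter predicate (i is a run start)
def pvP (cs : List Char) (c : Int) (i : Int) : Bool :=
  i == 0 ||
    !(PySem.List.slice cs (some i) (some (i + c))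
      == PySem.List.slice cs (some (i - c)) (some i))

-- B's boundary list with sentinel
def pvStarts (cs : List Char) (c : Int) : List Int :=
  ((PySem.List.pyRange 0 (cs.length : Int) c).filter (pvP cs c)) ++ [(cs.length : Int)]

-- sum of pvG over consecutive pairs
def pvPairs (c : Int) (l : List Int) : Int := ((l.zip l.tail).map (pvG c)).sum

theorem pvPairs_cons₂ (c x y : Int) (t : List Int) :
    pvPairs c (x :: y :: t) = pvG c (x, y) + pvPairs c (y :: t) := by
  simp [pvPairs, List.zip_cons_cons]

theorem pvPairs_shift (c d : Int) (l : List Int) :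
    pvPairs c (l.map (fun z => z + d)) = pvPairs c l := by
  unfold pvPairs
  have ht : (l.map (fun z => z + d)).tail = l.tail.map (fun z => z + d) := by
    cases l <;> rfl
  rw [ht, List.zip_map, List.map_map]
  apply congrArg List.sum
  apply List.map_congr_left
  intro ab _
  show pvG c (Prod.map (fun z => z + d) (fun z => z + d) ab) = pvG c ab
  cases ab with
  | mk a b =>
    simp only [Prod.map, pvG]
    rw [show b + d - (a + d) = b - a from by ring]

-- the first j chunks after the head of a run are all equal to the head
theorem pvRunAll (c : Nat) (hc : 1 ≤ c) (head : List Char) :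
    ∀ (j : Nat) (v : List Char),
      j < ((pvChunks (c - 1) v).takeWhile (· == head)).length →
      (v.drop (j * c)).take c = head := by
  intro j
  induction j with
  | zero =>
    intro v hlt
    rcases eq_or_ne v ([] : List Char) with rfl | hne
    · rw [pvChunks_nil] at hlt; simp at hlt
    · rw [pvChunks_ne c hc v hne, List.takeWhile_cons] at hlt
      by_cases hb : (v.take c == head) = true
      · have := beq_iff_eq.mp hb
        simpa using this
      · rw [if_neg hb] at hlt; simp at hlt
  | succ j ih =>
    intro v hlt
    rcases eq_or_ne v ([] : List Char) with rfl | hne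
    · rw [pvChunks_nil] at hlt; simp at hlt
    · rw [pvChunks_ne c hc v hne, List.takeWhile_cons] at hlt
      by_cases hb : (v.take c == head) = true
      · rw [if_pos hb, List.length_cons] at hlt
        have hrec := ih (v.drop c) (by omega)
        rw [List.drop_drop] at hrec
        rw [show (j + 1) * c = c + j * c from by ring]
        exact hrec
      · rw [if_neg hb] at hlt; simp at hlt

-- the chunk right after a maximal run differs from the head
theorem pvRunStop (c : Nat) (hc : 1 ≤ c) (head v : List Char)
    (h : v.drop (((pvChunks (c - 1) v).takeWhile (· == head)).length * c) ≠ []) :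
    ((v.drop (((pvChunks (c - 1) v).takeWhile (· == head)).length * c)).take c == head)
      = false := by
  have hd := pvDropRun c hc head v
  rw [pvChunks_ne c hc _ h] at hd
  have hnil : (pvChunks (c - 1) v).dropWhile (· == head) ≠ [] := by
    rw [hd]; simp
  have h0 := List.head_dropWhile_not (· == head) hnil
  simp only [hd, List.head_cons] at h0
  exact h0

-- pyRange 0 n c as chunk starts
theorem pvRangeClosed (n : Nat) (C : Int) (hC : 0 < C) (hn : 0 < n) :
    PySem.List.pyRange 0 (n : Int) C
      = (List.range (((n : Int) + C - 1) / C).toNat).map (fun k : Nat => C * (k : Int)) := by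
  rw [PySem.List.pyRange_of_pos _ _ hC, if_pos (by exact_mod_cast hn)]
  rw [show (n : Int) - 0 + C - 1 = (n : Int) + C - 1 from by ring]
  exact List.map_congr_left (fun k _ => by ring)

-- the predicate at a non-initial chunk start compares adjacent chunks
theorem pvP_at (u : List Char) (c j : Nat) (hc : 1 ≤ c) :
    pvP u (c : Int) ((c : Int) * ((j + 1 : Nat) : Int))
      = !((u.drop ((j + 1) * c)).take c == (u.drop (j * c)).take c) := by
  unfold pvP
  have hC : (0 : Int) < (c : Int) := by exact_mod_cast hc
  have hj : (0 : Int) < ((j + 1 : Nat) : Int) := by exact_mod_cast Nat.succ_pos j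
  have hpos : (0 : Int) < (c : Int) * ((j + 1 : Nat) : Int) := mul_pos hC hj
  have hi : (((c : Int) * ((j + 1 : Nat) : Int)) == 0) = false := by
    rw [beq_eq_false_iff_ne]
    omega
  rw [hi, Bool.false_or]
  have e1 : (c : Int) * ((j + 1 : Nat) : Int) = (((j + 1) * c : Nat) : Int) := by
    push_cast; ring
  have e2 : (c : Int) * ((j + 1 : Nat) : Int) - (c : Int) = ((j * c : Nat) : Int) := by
    push_cast; ring
  have e3 : (c : Int) * ((j + 1 : Nat) : Int) = ((j * c : Nat) : Int) + ((c : Nat) : Int) := by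
    push_cast; ring
  have hup : PySem.List.slice u (some ((c : Int) * ((j + 1 : Nat) : Int)))
      (some ((c : Int) * ((j + 1 : Nat) : Int) + (c : Int)))
      = (u.drop ((j + 1) * c)).take c := by
    rw [e1]
    exact PySem.List.slice_natCast_add u ((j + 1) * c) c
  have hlo : PySem.List.slice u (some ((c : Int) * ((j + 1 : Nat) : Int) - (c : Int)))
      (some ((c : Int) * ((j + 1 : Nat) : Int)))
      = (u.drop (j * c)).take c := by
    rw [e2, e3]
    exact PySem.List.slice_natCast_add u (j * c) c
  rw [hup, hlo]

-- empty-string boundary list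
theorem pvStarts_nil (c : Nat) (hc : 1 ≤ c) :
    pvStarts ([] : List Char) (c : Int) = [0] := by
  unfold pvStarts
  rw [PySem.List.pyRange_of_pos _ _ (by exact_mod_cast hc : (0:Int) < (c : Int))]
  simp

-- a nonempty string's boundary list starts at 0
theorem pvStarts_head? (c : Nat) (hc : 1 ≤ c) (v : List Char) :
    (pvStarts v (c : Int)).head? = some 0 := by
  rcases eq_or_ne v ([] : List Char) with rfl | hne
  · rw [pvStarts_nil c hc]
    rfl
  · have hn : 0 < v.length :=
      Nat.pos_of_ne_zero (fun h => hne (List.length_eq_zero_iff.mp h))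
    have hC : (0 : Int) < (c : Int) := by exact_mod_cast hc
    have hq1 : 1 ≤ (((v.length : Int) + (c : Int) - 1) / (c : Int)) := by
      rw [show (v.length : Int) + (c : Int) - 1 = ((v.length : Int) - 1) + 1 * (c : Int)
        from by ring, Int.add_mul_ediv_right _ _ (by omega)]
      have := Int.ediv_nonneg (show (0:Int) ≤ (v.length : Int) - 1 by omega) (le_of_lt hC)
      omega
    obtain ⟨K'', hK''⟩ : ∃ K'', (((v.length : Int) + (c : Int) - 1) / (c : Int)).toNat
        = K'' + 1 := ⟨(((v.length : Int) + (c : Int) - 1) / (c : Int)).toNat - 1, by omega⟩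
    unfold pvStarts
    rw [pvRangeClosed v.length (c : Int) hC hn, hK'', List.range_succ_eq_map,
      List.map_cons]
    rw [show (c : Int) * ((0 : Nat) : Int) = 0 from by push_cast; ring]
    rw [List.filter_cons_of_pos (by simp [pvP])]
    rfl

-- the main induction: pvPairs over pvStarts is pvRle of the chunk list
theorem pvBMainAux (c : Nat) (hc : 1 ≤ c) :
    ∀ (fuel : Nat) (u : List Char), u.length ≤ fuel →
      pvPairs (c : Int) (pvStarts u (c : Int)) = pvRle (pvChunks (c - 1) u) := by
  have hC : (0 : Int) < (c : Int) := by exact_mod_cast hc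
  intro fuel
  induction fuel with
  | zero =>
    intro u hu
    have : u = [] := List.length_eq_zero_iff.mp (by omega)
    subst this
    rw [pvStarts_nil c hc, pvChunks_nil, pvRle_nil]
    simp [pvPairs]
  | succ fuel ih =>
    intro u hu
    rcases eq_or_ne u ([] : List Char) with rfl | hne
    · rw [pvStarts_nil c hc, pvChunks_nil, pvRle_nil]
      simp [pvPairs]
    · have hn : 0 < u.length :=
        Nat.pos_of_ne_zero (fun h => hne (List.length_eq_zero_iff.mp h))
      rcases le_or_gt u.length c with hle | hgt
      · -- a single chunk: starts = [0, n]
        have hq : (((u.length : Int) + (c : Int) - 1) / (c : Int)) = 1 := by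
          rw [show (u.length : Int) + (c : Int) - 1
              = ((u.length : Int) - 1) + 1 * (c : Int) from by ring,
            Int.add_mul_ediv_right _ _ (by omega),
            Int.ediv_eq_zero_of_lt (by omega) (by omega)]
          norm_num
        have hstarts : pvStarts u (c : Int) = [0, (u.length : Int)] := by
          unfold pvStarts
          rw [pvRangeClosed u.length (c : Int) hC hn, hq]
          rw [show (1 : Int).toNat = 1 from rfl, List.range_one, List.map_singleton]
          rw [show (c : Int) * ((0 : Nat) : Int) = 0 from by push_cast; ring]
          simp [pvP]
        rw [hstarts]
        have hp : pvPairs (c : Int) [0, (u.length : Int)]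
            = pvG (c : Int) (0, (u.length : Int)) := by
          simp [pvPairs, List.zip_cons_cons]
        rw [hp]
        have hdropnil : u.drop c = [] := List.drop_eq_nil_of_le hle
        rw [pvChunks_ne c hc u hne, hdropnil, pvChunks_nil, pvRle]
        simp only [List.takeWhile_nil, List.dropWhile_nil, List.length_nil, Nat.cast_zero,
          add_zero, pvRle_nil, pvFlush]
        rw [if_pos (by simp)]
        simp only [pvG, List.length_take]
        have h1 : min ((u.length : Int) - 0) (c : Int) = (u.length : Int) := by omega
        have h2 : ¬ ((u.length : Int) - 0 > (c : Int)) := by omega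
        rw [h1, if_neg h2]
        have h3 : min c u.length = u.length := by omega
        rw [h3]
        ring
      · -- c < n : strip the first run
        set head : List Char := u.take c with hhead
        set r : Nat := ((pvChunks (c - 1) (u.drop c)).takeWhile (· == head)).length with hr
        have hheadfull : head.length = c := by
          rw [hhead, List.length_take]; omega
        have hchunkeq : ∀ j, j ≤ r → (u.drop (j * c)).take c = head := by
          intro j hj
          cases j with
          | zero => simp [hhead]
          | succ m =>
            have hma := pvRunAll c hc head m (u.drop c) (by omega)
            rw [List.drop_drop] at hma
            rw [show (m + 1) * c = c + m * c from by ring]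
            exact hma
        have hkc : (r + 1) * c ≤ u.length := by
          rcases Nat.eq_zero_or_pos r with h0 | hr1
          · rw [h0]; omega
          · have hre := hchunkeq r (le_refl r)
            have hlen := congrArg List.length hre
            rw [List.length_take, List.length_drop, hheadfull] at hlen
            have : (r + 1) * c = r * c + c := by ring
            omega
        set u' : List Char := u.drop ((r + 1) * c) with hu'
        have hu'len : u'.length = u.length - (r + 1) * c := by
          rw [hu', List.length_drop]
        have hlen' : (u'.length : Int) = (u.length : Int) - (((r + 1) * c : Nat) : Int) := by
          omega
        have hKsplit : (((u.length : Int) + (c : Int) - 1) / (c : Int)).toNat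
            = (r + 1) + ((((u'.length : Int)) + (c : Int) - 1) / (c : Int)).toNat := by
          have e : (u.length : Int) + (c : Int) - 1
              = ((u'.length : Int) + (c : Int) - 1) + ((r + 1 : Nat) : Int) * (c : Int) := by
            rw [hlen']; push_cast; ring
          rw [e, Int.add_mul_ediv_right _ _ (by omega)]
          have hnn : 0 ≤ ((u'.length : Int) + (c : Int) - 1) / (c : Int) :=
            Int.ediv_nonneg (by omega) (by omega)
          omega
        set K' : Nat := ((((u'.length : Int)) + (c : Int) - 1) / (c : Int)).toNat with hK'
        have hrangeu : PySem.List.pyRange 0 (u.length : Int) (c : Int)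
            = ((List.range (r + 1)).map (fun j : Nat => (c : Int) * (j : Int)))
              ++ ((List.range K').map (fun j : Nat => (c : Int) * (((r + 1) + j : Nat) : Int))) := by
          rw [pvRangeClosed u.length (c : Int) hC hn, hKsplit, List.range_add,
            List.map_append, List.map_map]
          rfl
        have hfilter1 : (((List.range (r + 1)).map
              (fun j : Nat => (c : Int) * (j : Int))).filter (pvP u (c : Int))) = [0] := by
          rw [List.range_succ_eq_map, List.map_cons]
          rw [show (c : Int) * ((0 : Nat) : Int) = 0 from by push_cast; ring]
          rw [List.filter_cons_of_pos (by simp [pvP])]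
          rw [List.map_map, List.filter_eq_nil_iff.mpr ?_]
          · intro j hj
            obtain ⟨m, hm, rfl⟩ := List.mem_map.mp hj
            rw [List.mem_range] at hm
            show ¬ pvP u (c : Int) ((c : Int) * ((m + 1 : Nat) : Int)) = true
            rw [pvP_at u c m hc]
            rw [hchunkeq (m + 1) (by omega), hchunkeq m (by omega)]
            simp
        have hu'chunk : ∀ i : Nat, (u'.drop (i * c)).take c
            = (u.drop (((r + 1) + i) * c)).take c := by
          intro i
          rw [hu', List.drop_drop]
          congr 2
          ring
        have hfilter2 : (((List.range K').map
              (fun j : Nat => (c : Int) * (((r + 1) + j : Nat) : Int))).filter (pvP u (c : Int)))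
            = ((((List.range K').map (fun j : Nat => (c : Int) * (j : Int))).filter
                (pvP u' (c : Int))).map (fun z => z + (((r + 1) * c : Nat) : Int))) := by
          rw [List.filter_map, List.filter_map, List.map_map]
          have hp : ∀ j ∈ List.range K',
              (pvP u (c : Int) ∘ (fun j : Nat => (c : Int) * (((r + 1) + j : Nat) : Int))) j
              = (pvP u' (c : Int) ∘ (fun j : Nat => (c : Int) * (j : Int))) j := by
            intro j hj
            rw [List.mem_range] at hj
            cases j with
            | zero =>
              have hu'ne : u' ≠ [] := by
                intro h0
                have : u'.length = 0 := by rw [h0]; rfl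
                have : K' = 0 := by
                  rw [hK', this]
                  rw [show ((0 : Nat) : Int) + (c : Int) - 1 = (c : Int) - 1 from by push_cast; ring]
                  rw [Int.ediv_eq_zero_of_lt (by omega) (by omega)]
                  rfl
                omega
              show pvP u (c : Int) ((c : Int) * (((r + 1) + 0 : Nat) : Int))
                  = pvP u' (c : Int) ((c : Int) * ((0 : Nat) : Int))
              rw [show ((r + 1) + 0 : Nat) = r + 1 from rfl]
              rw [pvP_at u c r hc]
              have hstop := pvRunStop c hc head (u.drop c) ?hne
              case hne =>
                rw [List.drop_drop, ← hr]
                rw [show c + r * c = (r + 1) * c from by ring]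
                exact hu'ne
              rw [List.drop_drop, ← hr, show c + r * c = (r + 1) * c from by ring] at hstop
              rw [hchunkeq r (le_refl r)]
              rw [← hu'] at hstop
              rw [← hu']
              rw [hstop]
              rw [show (c : Int) * ((0 : Nat) : Int) = 0 from by push_cast; ring]
              simp [pvP]
            | succ m =>
              show pvP u (c : Int) ((c : Int) * (((r + 1) + (m + 1) : Nat) : Int))
                  = pvP u' (c : Int) ((c : Int) * ((m + 1 : Nat) : Int))
              rw [show ((r + 1) + (m + 1) : Nat) = ((r + 1) + m) + 1 from by ring]
              rw [pvP_at u c ((r + 1) + m) hc, pvP_at u' c m hc]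
              rw [hu'chunk (m + 1), hu'chunk m]
              rw [show ((r + 1) + (m + 1)) * c = (((r + 1) + m) + 1) * c from by ring]
          rw [List.filter_congr hp]
          apply List.map_congr_left
          intro j _
          show (c : Int) * (((r + 1) + j : Nat) : Int)
              = (c : Int) * (j : Int) + (((r + 1) * c : Nat) : Int)
          push_cast; ring
        have hrange' : PySem.List.pyRange 0 (u'.length : Int) (c : Int)
            = (List.range K').map (fun j : Nat => (c : Int) * (j : Int)) := by
          rcases Nat.eq_zero_or_pos u'.length with hz | hpos
          · have hK'0 : K' = 0 := by
              rw [hK', hz]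
              rw [show ((0 : Nat) : Int) + (c : Int) - 1 = (c : Int) - 1 from by push_cast; ring]
              rw [Int.ediv_eq_zero_of_lt (by omega) (by omega)]
              rfl
            rw [hz, hK'0]
            rw [PySem.List.pyRange_of_pos _ _ hC]
            simp
          · rw [pvRangeClosed u'.length (c : Int) hC hpos, hK']
        have hstartsEq : pvStarts u (c : Int)
            = 0 :: ((pvStarts u' (c : Int)).map (fun z => z + (((r + 1) * c : Nat) : Int))) := by
          unfold pvStarts
          rw [hrangeu, List.filter_append, hfilter1, hfilter2, hrange']
          rw [show ((u.length : Int)) = ((u'.length : Int)) + (((r + 1) * c : Nat) : Int)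
            from by omega]
          simp [List.map_append]
        have hh := pvStarts_head? c hc u'
        have hlt : u'.length < u.length := by
          have : 0 < (r + 1) * c := Nat.mul_pos (Nat.succ_pos r) (by omega)
          omega
        have hIH := ih u' (by omega)
        obtain ⟨rest', hsp⟩ : ∃ rest', pvStarts u' (c : Int) = 0 :: rest' := by
          cases hsp : pvStarts u' (c : Int) with
          | nil => rw [hsp] at hh; simp at hh
          | cons x rest' =>
            rw [hsp] at hh
            simp only [List.head?_cons, Option.some.injEq] at hh
            exact ⟨rest', by rw [hh]⟩
        have hsum : pvPairs (c : Int) (pvStarts u (c : Int))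
            = pvG (c : Int) (0, 0 + (((r + 1) * c : Nat) : Int))
              + pvRle (pvChunks (c - 1) u') := by
          rw [hstartsEq, hsp]
          show pvPairs (c : Int)
              (0 :: (0 + (((r + 1) * c : Nat) : Int))
                :: rest'.map (fun z => z + (((r + 1) * c : Nat) : Int))) = _
          rw [pvPairs_cons₂]
          congr 1
          show pvPairs (c : Int)
              (((0 : Int) :: rest').map (fun z => z + (((r + 1) * c : Nat) : Int))) = _
          rw [← hsp, pvPairs_shift, hIH]
        rw [hsum, zero_add]
        -- right-hand side: peel the first run off pvRle
        rw [pvChunks_ne c hc u hne, pvRle, ← hr]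
        have hrest : (pvChunks (c - 1) (u.drop c)).dropWhile (· == head)
            = pvChunks (c - 1) u' := by
          rw [pvDropRun c hc head (u.drop c), ← hr, List.drop_drop]
          rw [show c + r * c = (r + 1) * c from by ring, ← hu']
        rw [hrest]
        -- remaining: pvG at the first pair equals the flush length
        have hflush : pvG (c : Int) (0, (((r + 1) * c : Nat) : Int))
            = ((pvFlush (1 + (r : Int)) head).length : Int) := by
          have hdc : ((r + 1) * c : Nat) / c = r + 1 := Nat.mul_div_cancel _ (by omega)
          rcases Nat.eq_zero_or_pos r with h0 | hr1
          · rw [h0]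
            have e1 : ((((0:Nat) + 1) * c : Nat) : Int) = ((c : Nat) : Int) := by norm_num
            simp only [pvG, pvFlush, e1]
            rw [if_neg (by omega : ¬ ((c : Int) - 0 > (c : Int)))]
            rw [if_pos (by norm_num : (((1:Int) + (((0:Nat)) : Int)) == 1) = true)]
            rw [hheadfull]
            omega
          · simp only [pvG, pvFlush]
            have hge : (c : Int) ≤ (((r + 1) * c : Nat) : Int) - 0 := by
              have : c ≤ (r + 1) * c := Nat.le_mul_of_pos_left c (by omega)
              omega
            have hgt2 : (((r + 1) * c : Nat) : Int) - 0 > (c : Int) := by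
              have : 2 * c ≤ (r + 1) * c := Nat.mul_le_mul_right c (by omega)
              omega
            rw [min_eq_right hge, if_pos hgt2]
            rw [if_neg (show ¬ (((1 : Int) + (r : Int) == 1) = true) from by simp; omega)]
            rw [show (((r + 1) * c : Nat) : Int) - 0 = (((r + 1) * c : Nat) : Int) from by ring]
            rw [PySem.Int.floordiv_natCast, hdc]
            rw [List.length_append, hheadfull]
            push_cast
            ring_nf
        rw [hflush]

theorem pvBMain (c : Nat) (hc : 1 ≤ c) (u : List Char) :
    pvPairs (c : Int) (pvStarts u (c : Int)) = pvRle (pvChunks (c - 1) u) :=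
  pvBMainAux c hc u.length u (le_refl _)

-- the literal per-cut expression of the B port is pvPairs over pvStarts
theorem pvPerCutB (cs : List Char) (cut : Int) :
    List.foldl
      (fun tot ab => tot + (min (ab.2 - ab.1) cut +
        (if ab.2 - ab.1 > cut then
          ((PySem.Int.toChars (PySem.Int.floordiv (ab.2 - ab.1) cut)).length : Int)
        else 0))) 0
      (List.zip
        ((List.filter
            (fun i => i == 0 ||
              !(PySem.List.slice cs (some i) (some (i + cut))
                == PySem.List.slice cs (some (i - cut)) (some i)))
            (PySem.List.pyRange 0 (cs.length : Int) cut)) ++ [(cs.length : Int)])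
        (PySem.List.slice
          ((List.filter
              (fun i => i == 0 ||
                !(PySem.List.slice cs (some i) (some (i + cut))
                  == PySem.List.slice cs (some (i - cut)) (some i)))
              (PySem.List.pyRange 0 (cs.length : Int) cut)) ++ [(cs.length : Int)])
          (some 1) none))
    = pvPairs cut (pvStarts cs cut) := by
  rw [PySem.List.slice_from_one]
  exact (PySem.List.foldl_add _ (pvG cut) 0).trans (by rw [zero_add]; rfl)

-- ===== VERDICT (by name: the statement is the Claim_ definition above) =====
theorem solution_spec : Claim_equal_solution := by
  intro s _
  show solution s = solution_alt s
  unfold solution solution_alt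
  simp only [PySem.Chars.len_eq, PySem.Int.floordiv_eq_ediv_of_pos (by norm_num : (0:Int) < 2)]
  rw [PySem.List.foldl_append_singleton_eq_map, List.singleton_append,
    PySem.List.min?_id_cons]
  show List.foldl min _ _ = _
  rw [List.foldl_map]
  apply PySem.List.foldl_congr_mem
  intro acc cut hcut
  obtain ⟨hc1, hc2⟩ := PySem.List.mem_pyRange_one.mp hcut
  have hcast : ((cut.toNat : Nat) : Int) = cut := Int.toNat_of_nonneg (by omega)
  have hc1' : 1 ≤ cut.toNat := by omega
  congr 1
  rw [pvPerCutB s.toList cut]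
  rw [pvPerCutA s.toList cut hc1 (by omega)]
  conv_lhs => rw [← hcast]
  rw [pvChunksEq cut.toNat hc1' s.toList, ← pvBMain cut.toNat hc1' s.toList, hcast]
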